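-- pv_equiv track=rewrite | github.com/Aryudesu/ABC | AlnMath/90.py | calc
-- ===== SOURCE A (Python) =====
-- def checkData(num: int, target: int) -> bool:
--     result = 1
--     while num:
--         result *= num % 10
--         num //= 10
--     return result == target
--
-- def calc(N, B):
--     if N < B:
--         return 0
--     result = 0
--     if checkData(B, 0):
--         result += 1
--     a = 1
--     while a <= N:
--         b = a
--         while b <= N:
--             c = b
--             while c <= N:
--                 d = c
--                 while d <= N:
--                     p = d
--                     if B + p <= N and checkData(B + p, p):
--                         result += 1
--                     d *= 7
--                 c *= 5
--             b *= 3
--         a *= 2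
--     return result
-- ===== SOURCE B (Python) =====
-- def _digitprod(n: int) -> int:
--     r = 1
--     while n > 0:
--         r *= n % 10
--         n //= 10
--     return r
--
-- def calc(N, B):
--     if N < B:
--         return 0
--     result = 1 if _digitprod(B) == 0 else 0
--     # generate all 7-smooth numbers <= N by a worklist/BFS over the divisor lattice
--     seen = {1}
--     stack = [1]
--     while stack:
--         v = stack.pop()
--         for pr in (2, 3, 5, 7):
--             w = v * pr
--             if w <= N and w not in seen:
--                 seen.add(w)
--                 stack.append(w)
--     for p in seen:
--         if B + p <= N and _digitprod(B + p) == p: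
--             result += 1
--     return result
-- ===== Notes on version B (the rewrite author's own statement) =====
-- stated objective: alternative
-- what changed: The four nested geometric while-loops enumerating 2^i*3^j*5^k*7^l are replaced by a single worklist/BFS over a dedup set that generates all 7-smooth numbers <= N by multiplying frontier elements by (2,3,5,7), followed by one counting pass over the set.
import Mathlib
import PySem

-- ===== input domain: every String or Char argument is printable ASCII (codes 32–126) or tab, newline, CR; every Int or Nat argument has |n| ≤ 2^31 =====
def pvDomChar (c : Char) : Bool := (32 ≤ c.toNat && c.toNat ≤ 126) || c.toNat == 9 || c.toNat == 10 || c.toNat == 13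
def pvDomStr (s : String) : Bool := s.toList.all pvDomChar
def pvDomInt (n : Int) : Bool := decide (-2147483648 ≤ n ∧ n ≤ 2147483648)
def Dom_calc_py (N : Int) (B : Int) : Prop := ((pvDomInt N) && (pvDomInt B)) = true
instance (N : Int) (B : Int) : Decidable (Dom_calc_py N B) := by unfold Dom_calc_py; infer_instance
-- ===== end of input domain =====

-- B replaces A's four nested geometric while-loops by a worklist (BFS) generation of the
-- set of 7-smooth numbers ≤ N followed by one counting pass (objective: alternative).

-- ===== PORT A =====
-- the `while num:` loop of checkData; exact for 0 ≤ num (Python diverges for num < 0 — excluded by Pre_)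
def cdLoop (num result : Int) : Int :=
  if 0 < num then cdLoop (PySem.Int.floordiv num 10) (result * PySem.Int.mod num 10) else result
termination_by num.toNat
decreasing_by
  rw [PySem.Int.floordiv_eq_ediv_of_pos (by omega)]
  omega

def checkData (num target : Int) : Bool := cdLoop num 1 == target

def loopD (N B : Int) (d result : Int) (hd : 0 < d) : Int :=
  if d ≤ N then
    loopD N B (d * 7) (if B + d ≤ N ∧ checkData (B + d) d then result + 1 else result) (mul_pos hd (by decide))
  else result
termination_by (N + 1 - d).toNat
decreasing_by omega

def loopC (N B : Int) (c result : Int) (hc : 0 < c) : Int :=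
  if c ≤ N then
    loopC N B (c * 5) (loopD N B c result hc) (mul_pos hc (by decide))
  else result
termination_by (N + 1 - c).toNat
decreasing_by omega

def loopB (N B : Int) (b result : Int) (hb : 0 < b) : Int :=
  if b ≤ N then
    loopB N B (b * 3) (loopC N B b result hb) (mul_pos hb (by decide))
  else result
termination_by (N + 1 - b).toNat
decreasing_by omega

def loopA (N B : Int) (a result : Int) (ha : 0 < a) : Int :=
  if a ≤ N then
    loopA N B (a * 2) (loopB N B a result ha) (mul_pos ha (by decide))
  else result
termination_by (N + 1 - a).toNat
decreasing_by omega

def calc_py (N : Int) (B : Int) : Int :=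
  if N < B then 0
  else
    let result : Int := 0
    let result := if checkData B 0 then result + 1 else result
    loopA N B 1 result one_pos

-- ===== PORT B =====
-- the `while n > 0:` loop of _digitprod (exact for every Int: Python's loop is guarded by n > 0)
def dpLoop (n r : Int) : Int :=
  if 0 < n then dpLoop (PySem.Int.floordiv n 10) (r * PySem.Int.mod n 10) else r
termination_by n.toNat
decreasing_by
  rw [PySem.Int.floordiv_eq_ediv_of_pos (by omega)]
  omega

def digitprod (n : Int) : Int := dpLoop n 1

-- one iteration of the inner `for pr in (2, 3, 5, 7)` body, on the state (seen, stack)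
def bstep (N v : Int) (st : PySem.Set Int × List Int) (pr : Int) : PySem.Set Int × List Int :=
  let w := v * pr
  if w ≤ N ∧ st.1.contains w = false then (st.1.add w, st.2 ++ [w]) else st

-- invariant carried by the worklist loop (erased at runtime; needed for termination)
def BfsInv (N : Int) (seen : PySem.Set Int) (stack : List Int) : Prop :=
  seen.Nodup ∧ (∀ x ∈ seen, 1 ≤ x ∧ x ≤ max 1 N) ∧ (∀ x ∈ stack, x ∈ seen)

-- a Nodup list of integers in [1, M] has at most M.toNat elements
theorem nodup_bounded_length (l : List Int) (M : Int) (hnd : l.Nodup)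
    (hb : ∀ x ∈ l, 1 ≤ x ∧ x ≤ M) : l.length ≤ M.toNat := by
  have hsub : l.toFinset ⊆ Finset.Icc 1 M := by
    intro x hx
    rw [List.mem_toFinset] at hx
    exact Finset.mem_Icc.mpr (hb x hx)
  have := Finset.card_le_card hsub
  rw [List.toFinset_card_of_nodup hnd, Int.card_Icc] at this
  omega

-- what one pass of the four-prime fold does to (seen, stack)
theorem bstep_fold_spec (N v : Int) (hv : 1 ≤ v) :
    ∀ (prs : List Int) (s : PySem.Set Int) (t : List Int),
    (∀ pr ∈ prs, 2 ≤ pr) → s.Nodup → (∀ x ∈ s, 1 ≤ x ∧ x ≤ max 1 N) → (∀ x ∈ t, x ∈ s) →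
    (let r := prs.foldl (bstep N v) (s, t)
     r.1.Nodup ∧ (∀ x ∈ r.1, 1 ≤ x ∧ x ≤ max 1 N) ∧ (∀ x ∈ r.2, x ∈ r.1) ∧
     s.length + r.2.length = r.1.length + t.length ∧
     (∀ x ∈ s, x ∈ r.1) ∧
     (∀ x ∈ r.1, x ∈ s ∨ ∃ pr ∈ prs, x = v * pr ∧ x ≤ N) ∧
     (∀ pr ∈ prs, v * pr ≤ N → v * pr ∈ r.1) ∧
     (∀ x ∈ t, x ∈ r.2) ∧
     (∀ x ∈ r.1, x ∈ s ∨ x ∈ r.2) ∧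
     t.length ≤ r.2.length) := by
  intro prs
  induction prs with
  | nil =>
    intro s t hprs hnd hb ht
    exact ⟨hnd, hb, ht, by simp, fun x hx => hx, fun x hx => Or.inl hx, by simp,
      fun x hx => hx, fun x hx => Or.inl hx, le_refl _⟩
  | cons pr prs ih =>
    intro s t hprs hnd hb ht
    have hpr : 2 ≤ pr := hprs pr (List.mem_cons_self)
    have hprs' : ∀ q ∈ prs, 2 ≤ q := fun q hq => hprs q (List.mem_cons_of_mem _ hq)
    simp only [List.foldl_cons]
    by_cases hcond : v * pr ≤ N ∧ (PySem.Set.contains s (v * pr)) = false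
    · have hw_notmem : v * pr ∉ s := by
        intro hmem
        have hct := (PySem.Set.contains_iff s (v * pr)).mpr hmem
        rw [hcond.2] at hct
        exact Bool.false_ne_true hct
      have hstep : bstep N v (s, t) pr = (s ++ [v * pr], t ++ [v * pr]) := by
        simp only [bstep]
        rw [if_pos hcond, PySem.Set.add_of_not_mem hw_notmem]
      rw [hstep]
      have hw1 : 1 ≤ v * pr := by nlinarith
      have hwb : v * pr ≤ max 1 N := le_trans hcond.1 (le_max_right 1 N)
      have hnd' : (s ++ [v * pr]).Nodup := by
        rw [← PySem.Set.add_of_not_mem hw_notmem]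
        exact PySem.Set.nodup_add s (v * pr) hnd
      have hb' : ∀ x ∈ s ++ [v * pr], 1 ≤ x ∧ x ≤ max 1 N := by
        intro x hx
        rcases List.mem_append.mp hx with h | h
        · exact hb x h
        · simp at h; subst h; exact ⟨hw1, hwb⟩
      have ht' : ∀ x ∈ t ++ [v * pr], x ∈ s ++ [v * pr] := by
        intro x hx
        rcases List.mem_append.mp hx with h | h
        · exact List.mem_append.mpr (Or.inl (ht x h))
        · exact List.mem_append.mpr (Or.inr h)
      obtain ⟨C1, C2, C3, C4, C5, C6, C7, C8, C9, C10⟩ := ih (s ++ [v * pr]) (t ++ [v * pr]) hprs' hnd' hb' ht'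
      have hsub : ∀ x ∈ s, x ∈ s ++ [v * pr] := fun x hx => List.mem_append.mpr (Or.inl hx)
      have hwmem : v * pr ∈ s ++ [v * pr] := List.mem_append.mpr (Or.inr (by simp))
      refine ⟨C1, C2, C3, by simp at C4 ⊢; omega, fun x hx => C5 x (hsub x hx), ?_, ?_, ?_, ?_, by simp at C10 ⊢; omega⟩
      · intro x hx
        rcases C6 x hx with h | h
        · rcases List.mem_append.mp h with h' | h'
          · exact Or.inl h'
          · simp at h'; exact Or.inr ⟨pr, List.mem_cons_self, h' ▸ ⟨rfl, h' ▸ hcond.1⟩⟩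
        · obtain ⟨q, hq, hxq⟩ := h
          exact Or.inr ⟨q, List.mem_cons_of_mem _ hq, hxq⟩
      · intro q hq hqN
        rcases List.mem_cons.mp hq with rfl | hq'
        · exact C5 _ hwmem
        · exact C7 q hq' hqN
      · intro x hx
        exact C8 x (List.mem_append.mpr (Or.inl hx))
      · intro x hx
        rcases C9 x hx with h | h
        · rcases List.mem_append.mp h with h' | h'
          · exact Or.inl h'
          · exact Or.inr (C8 x (List.mem_append.mpr (Or.inr h')))
        · exact Or.inr h
    · have hstep : bstep N v (s, t) pr = (s, t) := by
        simp only [bstep]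
        rw [if_neg hcond]
      rw [hstep]
      obtain ⟨C1, C2, C3, C4, C5, C6, C7, C8, C9, C10⟩ := ih s t hprs' hnd hb ht
      refine ⟨C1, C2, C3, C4, C5, ?_, ?_, C8, C9, C10⟩
      · intro x hx
        rcases C6 x hx with h | h
        · exact Or.inl h
        · obtain ⟨q, hq, hxq⟩ := h
          exact Or.inr ⟨q, List.mem_cons_of_mem _ hq, hxq⟩
      · intro q hq hqN
        rcases List.mem_cons.mp hq with rfl | hq'
        · have hctq : PySem.Set.contains s (v * q) = true := by
            rcases Bool.eq_false_or_eq_true (PySem.Set.contains s (v * q)) with h | h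
            · exact h
            · exact absurd ⟨hqN, h⟩ hcond
          exact C5 _ ((PySem.Set.contains_iff s (v * q)).mp hctq)
        · exact C7 q hq' hqN


def bfs (N : Int) (seen : PySem.Set Int) (stack : List Int) (h : BfsInv N seen stack) :
    PySem.Set Int :=
  if hs : stack = [] then seen
  else
    let v := stack.getLast hs
    let r := [2, 3, 5, 7].foldl (bstep N v) (seen, stack.dropLast)
    bfs N r.1 r.2 (by
      obtain ⟨hnd, hb, hst⟩ := h
      have hv : 1 ≤ v := (hb v (hst v (List.getLast_mem hs))).1
      have hspec := bstep_fold_spec N v hv [2, 3, 5, 7] seen stack.dropLast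
        (by decide) hnd hb (fun x hx => hst x (List.dropLast_subset _ hx))
      exact ⟨hspec.1, hspec.2.1, hspec.2.2.1⟩)
termination_by 5 * ((max 1 N).toNat + 1 - seen.length) + stack.length
decreasing_by
  obtain ⟨hnd, hb, hst⟩ := h
  have hv : 1 ≤ stack.getLast hs := (hb _ (hst _ (List.getLast_mem hs))).1
  have hspec := bstep_fold_spec N (stack.getLast hs) hv [2, 3, 5, 7] seen stack.dropLast
    (by decide) hnd hb (fun x hx => hst x (List.dropLast_subset _ hx))
  obtain ⟨hnd', hb', -, hlen, -, -, -, -, -, hge⟩ := hspec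
  have h1 : seen.length ≤ (max 1 N).toNat := nodup_bounded_length _ _ hnd hb
  have h2 : _ ≤ (max 1 N).toNat := nodup_bounded_length _ _ hnd' hb'
  have h3 : stack.dropLast.length = stack.length - 1 := by
    rw [List.length_dropLast]
  have h4 : 1 ≤ stack.length := List.length_pos_iff.mpr hs
  omega

def calc_py_alt (N : Int) (B : Int) : Int :=
  if N < B then 0
  else
    let result : Int := if digitprod B = 0 then 1 else 0
    let final := bfs N (PySem.Set.ofList [1]) [1]
      (by refine ⟨by decide, ?_, by simp⟩
          intro x hx
          simp [PySem.Set.ofList] at hx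
          subst hx
          exact ⟨le_refl 1, le_max_left 1 N⟩)
    final.foldl (fun acc p => if B + p ≤ N ∧ digitprod (B + p) = p then acc + 1 else acc) result

-- ===== PRECONDITION & SPEC =====
-- Pre_ excludes B < 0 ∧ B ≤ N: there Python's A calls checkData(B, 0) whose `num //= 10`
-- loop never reaches 0 for negative num, so A diverges (never returns).
def Pre_calc_py (N : Int) (B : Int) : Prop := 0 ≤ B ∨ N < B
instance (N : Int) (B : Int) : Decidable (Pre_calc_py N B) := by unfold Pre_calc_py; infer_instance
def pvWitness_calc_py : Int × Int := (100, 4)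

def Spec_calc_py (N : Int) (B : Int) (out : Int) : Prop := out = calc_py_alt N B
instance (N : Int) (B : Int) (out : Int) : Decidable (Spec_calc_py N B out) := by unfold Spec_calc_py; infer_instance

-- ===== CLAIM (what is proved, stated in full; the proofs are below) =====
def Claim_equal_calc_py : Prop := ∀ (N : Int) (B : Int), Dom_calc_py N B → Pre_calc_py N B → Spec_calc_py N B (calc_py N B)

-- ===== LEMMAS AND PROOFS =====

theorem cdLoop_eq_dpLoop (num r : Int) : cdLoop num r = dpLoop num r := by
  fun_induction cdLoop num r with
  | case1 num r h ih => rw [dpLoop, if_pos h]; exact ih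
  | case2 num r h => rw [dpLoop, if_neg h]

-- the geometric progression [x, x*r, x*r^2, …] of elements ≤ N (spec-side helper)
def geom (N r : Int) (hr : 2 ≤ r) (x : Int) : List Int :=
  if 0 < x ∧ x ≤ N then x :: geom N r hr (x * r) else []
termination_by (N + 1 - x).toNat
decreasing_by
  rename_i h
  have : x * 2 ≤ x * r := mul_le_mul_of_nonneg_left hr h.1.le
  omega

def Smooth (x : Int) : Prop := ∃ i j k l : ℕ, x = 2 ^ i * 3 ^ j * 5 ^ k * 7 ^ l

-- the predicate counted by both programs
abbrev cP (N B : Int) (p : Int) : Prop := B + p ≤ N ∧ digitprod (B + p) = p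

theorem geom_mem_fwd {N r : Int} (hr : 2 ≤ r) (x : Int) :
    ∀ p ∈ geom N r hr x, ∃ k : ℕ, p = x * r ^ k ∧ p ≤ N := by
  fun_induction geom N r hr x with
  | case1 x hcond ih =>
    intro p hp
    rcases List.mem_cons.mp hp with rfl | hp'
    · exact ⟨0, by ring, hcond.2⟩
    · obtain ⟨k, hk, hkN⟩ := ih p hp'
      exact ⟨k + 1, by rw [hk]; ring, hkN⟩
  | case2 x hcond =>
    intro p hp
    simp at hp
  
theorem geom_mem_bwd {N r : Int} (hr : 2 ≤ r) :
    ∀ (k : ℕ) (x : Int), 0 < x → x * r ^ k ≤ N → x * r ^ k ∈ geom N r hr x := by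
  intro k
  induction k with
  | zero =>
    intro x hx hle
    rw [geom, if_pos ⟨hx, by simpa using hle⟩]
    simp
  | succ k ih =>
    intro x hx hle
    have hx' : 0 < x * r := by positivity
    have h1 : (1 : ℤ) ≤ r ^ (k + 1) := one_le_pow₀ (by omega)
    have hxN : x ≤ N := by nlinarith
    rw [geom, if_pos ⟨hx, hxN⟩]
    refine List.mem_cons_of_mem _ ?_
    have heq : x * r * r ^ k = x * r ^ (k + 1) := by ring
    have := ih (x * r) hx' (by rw [heq]; exact hle)
    rwa [heq] at this

theorem mem_geom {N r : Int} (hr : 2 ≤ r) {x p : Int} (hx : 0 < x) :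
    p ∈ geom N r hr x ↔ ∃ k : ℕ, p = x * r ^ k ∧ p ≤ N := by
  constructor
  · exact geom_mem_fwd hr x p
  · rintro ⟨k, rfl, hN⟩
    exact geom_mem_bwd hr k x hx hN

theorem geom_pairwise {N r : Int} (hr : 2 ≤ r) (x : Int) :
    (geom N r hr x).Pairwise (· < ·) := by
  fun_induction geom N r hr x with
  | case1 x hcond ih =>
    refine List.pairwise_cons.mpr ⟨?_, ih⟩
    intro p hp
    obtain ⟨k, rfl, -⟩ := geom_mem_fwd hr _ p hp
    have h1 : (1 : ℤ) ≤ r ^ k := one_le_pow₀ (by omega)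
    have hxr : 2 * x ≤ x * r := by nlinarith [hcond.1]
    have h2 : x * r ≤ x * r * r ^ k := le_mul_of_one_le_right (by nlinarith [hcond.1]) h1
    linarith [hcond.1]
  | case2 x hcond => exact List.Pairwise.nil

theorem geom_nodup {N r : Int} (hr : 2 ≤ r) (x : Int) : (geom N r hr x).Nodup :=
  (geom_pairwise hr x).imp ne_of_lt

-- the list A's four nested loops enumerate
def enumA (N : Int) : List Int :=
  (geom N 2 (by omega) 1).flatMap fun b =>
    (geom N 3 (by omega) b).flatMap fun c =>
      (geom N 5 (by omega) c).flatMap fun d =>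
        geom N 7 (by omega) d

theorem cond_iff (N B p : Int) : (B + p ≤ N ∧ checkData (B + p) p = true) ↔ cP N B p := by
  unfold checkData cP digitprod
  rw [cdLoop_eq_dpLoop]
  simp

theorem loopD_eq (N B d res : Int) (hd : 0 < d) :
    loopD N B d res hd = res + ((geom N 7 (by omega) d).countP (fun p => decide (cP N B p)) : ℤ) := by
  fun_induction loopD N B d res hd with
  | case1 d res hd hle ih =>
    simp only [dite_eq_ite] at ih
    have hgeom7 : geom N 7 (by omega) d = d :: geom N 7 (by omega) (d * 7) := by
      rw [geom, if_pos ⟨hd, hle⟩]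
    rw [ih, hgeom7, List.countP_cons]
    by_cases hc : cP N B d
    · rw [if_pos ((cond_iff N B d).mpr hc)]
      rw [if_pos (decide_eq_true hc)]
      push_cast
      ring
    · rw [if_neg (fun hcc => hc ((cond_iff N B d).mp hcc))]
      rw [if_neg (by simpa using hc)]
      push_cast
      ring
  | case2 d res hd hle =>
    rw [geom, if_neg (fun hcc => hle hcc.2)]
    simp

theorem loopC_eq (N B c res : Int) (hc : 0 < c) :
    loopC N B c res hc = res +
      (((geom N 5 (by omega) c).flatMap fun d => geom N 7 (by omega) d).countP
        (fun p => decide (cP N B p)) : ℤ) := by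
  fun_induction loopC N B c res hc with
  | case1 c res hc hle ih =>
    have hgeom5 : geom N 5 (by omega) c = c :: geom N 5 (by omega) (c * 5) := by
      rw [geom, if_pos ⟨hc, hle⟩]
    rw [ih, loopD_eq, hgeom5, List.flatMap_cons, List.countP_append]
    push_cast
    ring
  | case2 c res hc hle =>
    rw [geom, if_neg (fun hcc => hle hcc.2)]
    simp

theorem loopB_eq (N B b res : Int) (hb : 0 < b) :
    loopB N B b res hb = res +
      (((geom N 3 (by omega) b).flatMap fun c => (geom N 5 (by omega) c).flatMap fun d =>
        geom N 7 (by omega) d).countP (fun p => decide (cP N B p)) : ℤ) := by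
  fun_induction loopB N B b res hb with
  | case1 b res hb hle ih =>
    have hgeom3 : geom N 3 (by omega) b = b :: geom N 3 (by omega) (b * 3) := by
      rw [geom, if_pos ⟨hb, hle⟩]
    rw [ih, loopC_eq, hgeom3, List.flatMap_cons, List.countP_append]
    push_cast
    ring
  | case2 b res hb hle =>
    rw [geom, if_neg (fun hcc => hle hcc.2)]
    simp

theorem loopA_eq (N B a res : Int) (ha : 0 < a) :
    loopA N B a res ha = res +
      (((geom N 2 (by omega) a).flatMap fun b => (geom N 3 (by omega) b).flatMap fun c =>
        (geom N 5 (by omega) c).flatMap fun d =>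
        geom N 7 (by omega) d).countP (fun p => decide (cP N B p)) : ℤ) := by
  fun_induction loopA N B a res ha with
  | case1 a res ha hle ih =>
    have hgeom2 : geom N 2 (by omega) a = a :: geom N 2 (by omega) (a * 2) := by
      rw [geom, if_pos ⟨ha, hle⟩]
    rw [ih, loopB_eq, hgeom2, List.flatMap_cons, List.countP_append]
    push_cast
    ring
  | case2 a res ha hle =>
    rw [geom, if_neg (fun hcc => hle hcc.2)]
    simp

theorem mem_L5 {N c p : Int} (hc : 0 < c) :
    p ∈ (geom N 5 (by omega) c).flatMap (fun d => geom N 7 (by omega) d) ↔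
      ∃ k l : ℕ, p = c * 5 ^ k * 7 ^ l ∧ p ≤ N := by
  rw [List.mem_flatMap]
  constructor
  · rintro ⟨d, hd, hp⟩
    obtain ⟨k, rfl, -⟩ := (mem_geom (by omega) hc).mp hd
    have hdpos : 0 < c * 5 ^ k := by positivity
    obtain ⟨l, rfl, hN⟩ := (mem_geom (by omega) hdpos).mp hp
    exact ⟨k, l, rfl, hN⟩
  · rintro ⟨k, l, rfl, hN⟩
    have hdpos : 0 < c * 5 ^ k := by positivity
    have h7 : (1 : ℤ) ≤ 7 ^ l := one_le_pow₀ (by omega)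
    have hstep : c * 5 ^ k ≤ c * 5 ^ k * 7 ^ l := le_mul_of_one_le_right hdpos.le h7
    exact ⟨c * 5 ^ k, (mem_geom (by omega) hc).mpr ⟨k, rfl, by linarith⟩,
      (mem_geom (by omega) hdpos).mpr ⟨l, rfl, hN⟩⟩

theorem mem_L3 {N b p : Int} (hb : 0 < b) :
    p ∈ (geom N 3 (by omega) b).flatMap
        (fun c => (geom N 5 (by omega) c).flatMap fun d => geom N 7 (by omega) d) ↔
      ∃ j k l : ℕ, p = b * 3 ^ j * 5 ^ k * 7 ^ l ∧ p ≤ N := by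
  rw [List.mem_flatMap]
  constructor
  · rintro ⟨c, hcmem, hp⟩
    obtain ⟨j, rfl, -⟩ := (mem_geom (by omega) hb).mp hcmem
    have hcpos : 0 < b * 3 ^ j := by positivity
    obtain ⟨k, l, rfl, hN⟩ := (mem_L5 hcpos).mp hp
    exact ⟨j, k, l, rfl, hN⟩
  · rintro ⟨j, k, l, rfl, hN⟩
    have hcpos : 0 < b * 3 ^ j := by positivity
    have h5 : (1 : ℤ) ≤ 5 ^ k := one_le_pow₀ (by omega)
    have h7 : (1 : ℤ) ≤ 7 ^ l := one_le_pow₀ (by omega)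
    have t1 : b * 3 ^ j ≤ b * 3 ^ j * 5 ^ k := le_mul_of_one_le_right hcpos.le h5
    have t2 : b * 3 ^ j * 5 ^ k ≤ b * 3 ^ j * 5 ^ k * 7 ^ l :=
      le_mul_of_one_le_right (by positivity) h7
    exact ⟨b * 3 ^ j, (mem_geom (by omega) hb).mpr ⟨j, rfl, by linarith⟩,
      (mem_L5 hcpos).mpr ⟨k, l, rfl, hN⟩⟩

theorem mem_enumA {N p : Int} : p ∈ enumA N ↔ Smooth p ∧ p ≤ N := by
  unfold enumA
  rw [List.mem_flatMap]
  constructor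
  · rintro ⟨b, hbmem, hp⟩
    obtain ⟨i, rfl, -⟩ := (mem_geom (by omega) (by omega : (0:ℤ) < 1)).mp hbmem
    have hbpos : 0 < (1:ℤ) * 2 ^ i := by positivity
    obtain ⟨j, k, l, rfl, hN⟩ := (mem_L3 hbpos).mp hp
    exact ⟨⟨i, j, k, l, by ring⟩, hN⟩
  · rintro ⟨⟨i, j, k, l, rfl⟩, hN⟩
    have hbpos : 0 < (1:ℤ) * 2 ^ i := by positivity
    have h3 : (1 : ℤ) ≤ 3 ^ j := one_le_pow₀ (by omega)
    have h5 : (1 : ℤ) ≤ 5 ^ k := one_le_pow₀ (by omega)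
    have h7 : (1 : ℤ) ≤ 7 ^ l := one_le_pow₀ (by omega)
    have t1 : (1:ℤ) * 2 ^ i ≤ 1 * 2 ^ i * 3 ^ j := le_mul_of_one_le_right hbpos.le h3
    have t2 : (1:ℤ) * 2 ^ i * 3 ^ j ≤ 1 * 2 ^ i * 3 ^ j * 5 ^ k :=
      le_mul_of_one_le_right (by positivity) h5
    have t3 : (1:ℤ) * 2 ^ i * 3 ^ j * 5 ^ k ≤ 1 * 2 ^ i * 3 ^ j * 5 ^ k * 7 ^ l :=
      le_mul_of_one_le_right (by positivity) h7
    have hrw : (1:ℤ) * 2 ^ i * 3 ^ j * 5 ^ k * 7 ^ l = 2 ^ i * 3 ^ j * 5 ^ k * 7 ^ l := by ring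
    exact ⟨1 * 2 ^ i, (mem_geom (by omega) (by omega : (0:ℤ) < 1)).mpr ⟨i, rfl, by linarith⟩,
      (mem_L3 hbpos).mpr ⟨j, k, l, by ring, hN⟩⟩

-- unique factorisation: the leading prime power of a {2,3,5,7}-product is determined
theorem prime_pow_mul_inj {p : ℕ} (hp : p.Prime) {a a' e e' : ℕ}
    (ha : ¬ p ∣ a) (ha' : ¬ p ∣ a') (h : p ^ e * a = p ^ e' * a') : e = e' := by
  have ha0 : a ≠ 0 := fun h0 => ha (h0 ▸ dvd_zero p)
  have ha0' : a' ≠ 0 := fun h0 => ha' (h0 ▸ dvd_zero p)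
  have hfa := congrArg (fun n => n.factorization p) h
  simpa [Nat.factorization_mul (pow_ne_zero e hp.pos.ne') ha0,
    Nat.factorization_mul (pow_ne_zero e' hp.pos.ne') ha0', hp.factorization_pow,
    Nat.factorization_eq_zero_of_not_dvd ha, Nat.factorization_eq_zero_of_not_dvd ha'] using hfa

theorem five_not_dvd {l : ℕ} : ¬ (5 : ℕ) ∣ 7 ^ l := fun h =>
  absurd (Nat.Prime.dvd_of_dvd_pow (by norm_num) h) (by norm_num)

theorem three_not_dvd {k l : ℕ} : ¬ (3 : ℕ) ∣ 5 ^ k * 7 ^ l := by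
  intro h
  rcases (Nat.Prime.dvd_mul (by norm_num)).mp h with h | h
  · exact absurd (Nat.Prime.dvd_of_dvd_pow (by norm_num) h) (by norm_num)
  · exact absurd (Nat.Prime.dvd_of_dvd_pow (by norm_num) h) (by norm_num)

theorem two_not_dvd {j k l : ℕ} : ¬ (2 : ℕ) ∣ 3 ^ j * 5 ^ k * 7 ^ l := by
  intro h
  rcases (Nat.Prime.dvd_mul (by norm_num)).mp h with h | h
  · rcases (Nat.Prime.dvd_mul (by norm_num)).mp h with h | h
    · exact absurd (Nat.Prime.dvd_of_dvd_pow (by norm_num) h) (by norm_num)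
    · exact absurd (Nat.Prime.dvd_of_dvd_pow (by norm_num) h) (by norm_num)
  · exact absurd (Nat.Prime.dvd_of_dvd_pow (by norm_num) h) (by norm_num)

theorem int5_inj {k l k' l' : ℕ} (h : (5:ℤ) ^ k * 7 ^ l = 5 ^ k' * 7 ^ l') : k = k' := by
  have hnat : (5:ℕ) ^ k * 7 ^ l = 5 ^ k' * 7 ^ l' := by exact_mod_cast h
  exact prime_pow_mul_inj (by norm_num) five_not_dvd five_not_dvd hnat

theorem int3_inj {j k l j' k' l' : ℕ}
    (h : (3:ℤ) ^ j * 5 ^ k * 7 ^ l = 3 ^ j' * 5 ^ k' * 7 ^ l') : j = j' := by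
  have hnat : (3:ℕ) ^ j * (5 ^ k * 7 ^ l) = 3 ^ j' * (5 ^ k' * 7 ^ l') := by
    have : (3:ℕ)^j * 5^k * 7^l = 3^j' * 5^k' * 7^l' := by exact_mod_cast h
    calc (3:ℕ)^j * (5^k*7^l) = 3^j * 5^k * 7^l := by ring
    _ = 3^j' * 5^k' * 7^l' := this
    _ = 3^j' * (5^k'*7^l') := by ring
  exact prime_pow_mul_inj (by norm_num) three_not_dvd three_not_dvd hnat

theorem int2_inj {i j k l i' j' k' l' : ℕ}
    (h : (2:ℤ) ^ i * 3 ^ j * 5 ^ k * 7 ^ l = 2 ^ i' * 3 ^ j' * 5 ^ k' * 7 ^ l') : i = i' := by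
  have hnat : (2:ℕ) ^ i * (3 ^ j * 5 ^ k * 7 ^ l) = 2 ^ i' * (3 ^ j' * 5 ^ k' * 7 ^ l') := by
    have : (2:ℕ)^i * 3^j * 5^k * 7^l = 2^i' * 3^j' * 5^k' * 7^l' := by exact_mod_cast h
    calc (2:ℕ)^i * (3^j*5^k*7^l) = 2^i * 3^j * 5^k * 7^l := by ring
    _ = 2^i' * 3^j' * 5^k' * 7^l' := this
    _ = 2^i' * (3^j'*5^k'*7^l') := by ring
  exact prime_pow_mul_inj (by norm_num) two_not_dvd two_not_dvd hnat

theorem nodup_L5 {N c : Int} (hc : 0 < c) :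
    ((geom N 5 (by omega) c).flatMap fun d => geom N 7 (by omega) d).Nodup := by
  rw [List.nodup_flatMap]
  refine ⟨fun d _ => geom_nodup _ _, (geom_pairwise _ _).imp_of_mem ?_⟩
  intro d d' hdm hd'm hlt p hp hp'
  obtain ⟨k, rfl, -⟩ := (mem_geom (by omega) hc).mp hdm
  obtain ⟨k', rfl, -⟩ := (mem_geom (by omega) hc).mp hd'm
  have hdpos : 0 < c * 5 ^ k := by positivity
  have hdpos' : 0 < c * 5 ^ k' := by positivity
  obtain ⟨l, rfl, -⟩ := (mem_geom (by omega) hdpos).mp hp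
  obtain ⟨l', hpeq, -⟩ := (mem_geom (by omega) hdpos').mp hp'
  have h2 : c * ((5:ℤ) ^ k * 7 ^ l) = c * (5 ^ k' * 7 ^ l') := by
    rw [← mul_assoc, ← mul_assoc]; exact hpeq
  have hk : k = k' := int5_inj (mul_left_cancel₀ (ne_of_gt hc) h2)
  subst hk
  exact absurd rfl (ne_of_lt hlt)

theorem nodup_L3 {N b : Int} (hb : 0 < b) :
    ((geom N 3 (by omega) b).flatMap fun c =>
      (geom N 5 (by omega) c).flatMap fun d => geom N 7 (by omega) d).Nodup := by
  rw [List.nodup_flatMap]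
  refine ⟨?_, (geom_pairwise _ _).imp_of_mem ?_⟩
  · intro c hcm
    obtain ⟨j, rfl, -⟩ := (mem_geom (by omega) hb).mp hcm
    exact nodup_L5 (by positivity)
  · intro c c' hcm hc'm hlt p hp hp'
    obtain ⟨j, rfl, -⟩ := (mem_geom (by omega) hb).mp hcm
    obtain ⟨j', rfl, -⟩ := (mem_geom (by omega) hb).mp hc'm
    obtain ⟨k, l, hpeq, -⟩ := (mem_L5 (by positivity)).mp hp
    obtain ⟨k', l', hpeq', -⟩ := (mem_L5 (by positivity)).mp hp'
    have h2 : b * ((3:ℤ) ^ j * 5 ^ k * 7 ^ l) = b * (3 ^ j' * 5 ^ k' * 7 ^ l') := by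
      rw [show b * ((3:ℤ) ^ j * 5 ^ k * 7 ^ l) = b * 3 ^ j * 5 ^ k * 7 ^ l from by ring,
        show b * ((3:ℤ) ^ j' * 5 ^ k' * 7 ^ l') = b * 3 ^ j' * 5 ^ k' * 7 ^ l' from by ring,
        ← hpeq, ← hpeq']
    have hj : j = j' := int3_inj (mul_left_cancel₀ (ne_of_gt hb) h2)
    subst hj
    exact absurd rfl (ne_of_lt hlt)

theorem enumA_nodup (N : Int) : (enumA N).Nodup := by
  unfold enumA
  rw [List.nodup_flatMap]
  refine ⟨?_, (geom_pairwise _ _).imp_of_mem ?_⟩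
  · intro b hbm
    obtain ⟨i, rfl, -⟩ := (mem_geom (by omega) (by omega : (0:ℤ) < 1)).mp hbm
    exact nodup_L3 (by positivity)
  · intro b b' hbm hb'm hlt p hp hp'
    obtain ⟨i, rfl, -⟩ := (mem_geom (by omega) (by omega : (0:ℤ) < 1)).mp hbm
    obtain ⟨i', rfl, -⟩ := (mem_geom (by omega) (by omega : (0:ℤ) < 1)).mp hb'm
    obtain ⟨j, k, l, hpeq, -⟩ := (mem_L3 (by positivity)).mp hp
    obtain ⟨j', k', l', hpeq', -⟩ := (mem_L3 (by positivity)).mp hp'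
    have h2 : (2:ℤ) ^ i * 3 ^ j * 5 ^ k * 7 ^ l = 2 ^ i' * 3 ^ j' * 5 ^ k' * 7 ^ l' := by
      rw [show (2:ℤ) ^ i * 3 ^ j * 5 ^ k * 7 ^ l = 1 * 2 ^ i * 3 ^ j * 5 ^ k * 7 ^ l from by ring,
        show (2:ℤ) ^ i' * 3 ^ j' * 5 ^ k' * 7 ^ l' = 1 * 2 ^ i' * 3 ^ j' * 5 ^ k' * 7 ^ l' from by
          ring, ← hpeq, ← hpeq']
    have hi : i = i' := int2_inj h2
    subst hi
    exact absurd rfl (ne_of_lt hlt)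

theorem smooth_pos {x : Int} (h : Smooth x) : 0 < x := by
  obtain ⟨i, j, k, l, rfl⟩ := h
  positivity

-- ----- BFS characterisation -----

-- the step data used by every bfs induction case
theorem bfs_step_spec (N : Int) (seen : PySem.Set Int) (stack : List Int)
    (hs : ¬ stack = []) (h : BfsInv N seen stack) :
    (let r := [2, 3, 5, 7].foldl (bstep N (stack.getLast hs)) (seen, stack.dropLast)
     r.1.Nodup ∧ (∀ x ∈ r.1, 1 ≤ x ∧ x ≤ max 1 N) ∧ (∀ x ∈ r.2, x ∈ r.1) ∧
     seen.length + r.2.length = r.1.length + stack.dropLast.length ∧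
     (∀ x ∈ seen, x ∈ r.1) ∧
     (∀ x ∈ r.1, x ∈ seen ∨ ∃ pr ∈ ([2, 3, 5, 7] : List Int), x = stack.getLast hs * pr ∧ x ≤ N) ∧
     (∀ pr ∈ ([2, 3, 5, 7] : List Int), stack.getLast hs * pr ≤ N → stack.getLast hs * pr ∈ r.1) ∧
     (∀ x ∈ stack.dropLast, x ∈ r.2) ∧
     (∀ x ∈ r.1, x ∈ seen ∨ x ∈ r.2) ∧
     stack.dropLast.length ≤ r.2.length) := by
  obtain ⟨hnd, hb, hst⟩ := h
  exact bstep_fold_spec N (stack.getLast hs) (hb _ (hst _ (List.getLast_mem hs))).1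
    [2, 3, 5, 7] seen stack.dropLast (by decide) hnd hb
    (fun x hx => hst x (List.dropLast_subset _ hx))

theorem bfs_grow (N : Int) (seen : PySem.Set Int) (stack : List Int) (h : BfsInv N seen stack) :
    ∀ x ∈ seen, x ∈ bfs N seen stack h := by
  fun_induction bfs N seen stack h with
  | case1 seen h => exact fun x hx => hx
  | case2 seen stack h hs v r ih =>
    intro x hx
    exact ih x ((bfs_step_spec N seen stack hs h).2.2.2.2.1 x hx)

theorem bfs_nodup (N : Int) (seen : PySem.Set Int) (stack : List Int) (h : BfsInv N seen stack) :
    (bfs N seen stack h).Nodup := by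
  fun_induction bfs N seen stack h with
  | case1 seen h => exact h.1
  | case2 seen stack h hs v r ih => exact ih

theorem bfs_sound (N : Int) (P : Int → Prop)
    (hclosed : ∀ v pr : Int, P v → pr ∈ ([2, 3, 5, 7] : List Int) → v * pr ≤ N → P (v * pr)) :
    ∀ (seen : PySem.Set Int) (stack : List Int) (h : BfsInv N seen stack),
      (∀ x ∈ seen, P x) → ∀ x ∈ bfs N seen stack h, P x := by
  intro seen stack h
  fun_induction bfs N seen stack h with
  | case1 seen h => exact fun hseen => hseen
  | case2 seen stack h hs v r ih =>
    intro hseen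
    refine ih ?_
    intro x hx
    rcases (bfs_step_spec N seen stack hs h).2.2.2.2.2.1 x hx with hxs | ⟨pr, hpr, rfl, hle⟩
    · exact hseen x hxs
    · exact hclosed _ pr (hseen _ (h.2.2 _ (List.getLast_mem hs))) hpr hle

theorem bfs_closed (N : Int) :
    ∀ (seen : PySem.Set Int) (stack : List Int) (h : BfsInv N seen stack),
    (∀ x ∈ seen, x ∉ stack → ∀ pr ∈ ([2, 3, 5, 7] : List Int), x * pr ≤ N → x * pr ∈ seen) →
    ∀ x ∈ bfs N seen stack h, ∀ pr ∈ ([2, 3, 5, 7] : List Int), x * pr ≤ N →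
      x * pr ∈ bfs N seen stack h := by
  intro seen stack h
  fun_induction bfs N seen stack h with
  | case1 seen h =>
    intro hc x hx pr hpr hle
    exact hc x hx (by simp) pr hpr hle
  | case2 seen stack h hs v r ih =>
    intro hc
    obtain ⟨C1, C2, C3, C4, C5, C6, C7, C8, C9, C10⟩ := bfs_step_spec N seen stack hs h
    refine ih ?_
    intro x hx hxr pr hpr hle
    rcases C9 x hx with hxs | hxr2
    · by_cases hxv : x = stack.getLast hs
      · subst hxv
        exact C7 pr hpr hle
      · have hxstack : x ∉ stack := by
          intro hxst
          rw [← List.dropLast_append_getLast hs] at hxst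
          rcases List.mem_append.mp hxst with h' | h'
          · exact hxr (C8 x h')
          · simp at h'
            exact hxv h'
        exact C5 _ (hc x hxs hxstack pr hpr hle)
    · exact absurd hxr2 hxr

theorem smooth_mul {v pr : Int} (hs : Smooth v) (hpr : pr ∈ ([2, 3, 5, 7] : List Int)) :
    Smooth (v * pr) := by
  obtain ⟨i, j, k, l, rfl⟩ := hs
  fin_cases hpr
  · exact ⟨i + 1, j, k, l, by ring⟩
  · exact ⟨i, j + 1, k, l, by ring⟩
  · exact ⟨i, j, k + 1, l, by ring⟩
  · exact ⟨i, j, k, l + 1, by ring⟩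

theorem smooth_le_mem (N : Int) (final : PySem.Set Int) (h1 : (1 : Int) ∈ final)
    (hcl : ∀ x ∈ final, ∀ pr ∈ ([2, 3, 5, 7] : List Int), x * pr ≤ N → x * pr ∈ final) :
    ∀ (n : ℕ) (x : Int), x.toNat = n → Smooth x → (x = 1 ∨ x ≤ N) → x ∈ final := by
  intro n
  induction n using Nat.strong_induction_on with
  | _ n ih =>
    rintro x hxn ⟨i, j, k, l, rfl⟩ hor
    have hstep : ∀ y pr : Int, 0 < y → y ∈ final → pr ∈ ([2, 3, 5, 7] : List Int) →
        2 ^ i * 3 ^ j * 5 ^ k * 7 ^ l = y * pr → y * pr ∈ final := by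
      intro y pr hy hyf hpr hx
      have hxN : y * pr ≤ N := by
        rcases hor with h1' | h1'
        · rw [hx] at h1'
          exfalso
          have : 2 ≤ pr := by fin_cases hpr <;> norm_num
          nlinarith
        · rw [← hx]; exact h1'
      exact hcl y hyf pr hpr hxN
    cases i with
    | succ i' =>
      have hy : (0:ℤ) < (2:ℤ) ^ i' * 3 ^ j * 5 ^ k * 7 ^ l := by positivity
      have heq : (2:ℤ) ^ (i' + 1) * 3 ^ j * 5 ^ k * 7 ^ l = (2:ℤ) ^ i' * 3 ^ j * 5 ^ k * 7 ^ l * 2 := by ring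
      have hxpos : (0:ℤ) < (2:ℤ) ^ (i' + 1) * 3 ^ j * 5 ^ k * 7 ^ l := by positivity
      have hylt : (2:ℤ) ^ i' * 3 ^ j * 5 ^ k * 7 ^ l < (2:ℤ) ^ (i' + 1) * 3 ^ j * 5 ^ k * 7 ^ l := by rw [heq]; linarith
      have hyN : (2:ℤ) ^ i' * 3 ^ j * 5 ^ k * 7 ^ l ≤ N := by
        rcases hor with h' | h'
        · rw [heq] at h'
          exfalso
          linarith
        · linarith
      have hymem := ih ((2:ℤ) ^ i' * 3 ^ j * 5 ^ k * 7 ^ l).toNat (by rw [← hxn]; exact (Int.toNat_lt_toNat hxpos).mpr hylt)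
        _ rfl ⟨i', j, k, l, rfl⟩ (Or.inr hyN)
      have hin := hstep _ 2 hy hymem (by norm_num) heq
      rw [heq]
      exact hin
    | zero =>
      cases j with
      | succ j' =>
      have hy : (0:ℤ) < (2:ℤ) ^ 0 * 3 ^ j' * 5 ^ k * 7 ^ l := by positivity
      have heq : (2:ℤ) ^ 0 * 3 ^ (j' + 1) * 5 ^ k * 7 ^ l = (2:ℤ) ^ 0 * 3 ^ j' * 5 ^ k * 7 ^ l * 3 := by ring
      have hxpos : (0:ℤ) < (2:ℤ) ^ 0 * 3 ^ (j' + 1) * 5 ^ k * 7 ^ l := by positivity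
      have hylt : (2:ℤ) ^ 0 * 3 ^ j' * 5 ^ k * 7 ^ l < (2:ℤ) ^ 0 * 3 ^ (j' + 1) * 5 ^ k * 7 ^ l := by rw [heq]; linarith
      have hyN : (2:ℤ) ^ 0 * 3 ^ j' * 5 ^ k * 7 ^ l ≤ N := by
        rcases hor with h' | h'
        · rw [heq] at h'
          exfalso
          linarith
        · linarith
      have hymem := ih ((2:ℤ) ^ 0 * 3 ^ j' * 5 ^ k * 7 ^ l).toNat (by rw [← hxn]; exact (Int.toNat_lt_toNat hxpos).mpr hylt)
        _ rfl ⟨0, j', k, l, rfl⟩ (Or.inr hyN)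
      have hin := hstep _ 3 hy hymem (by norm_num) heq
      rw [heq]
      exact hin
      | zero =>
        cases k with
        | succ k' =>
      have hy : (0:ℤ) < (2:ℤ) ^ 0 * 3 ^ 0 * 5 ^ k' * 7 ^ l := by positivity
      have heq : (2:ℤ) ^ 0 * 3 ^ 0 * 5 ^ (k' + 1) * 7 ^ l = (2:ℤ) ^ 0 * 3 ^ 0 * 5 ^ k' * 7 ^ l * 5 := by ring
      have hxpos : (0:ℤ) < (2:ℤ) ^ 0 * 3 ^ 0 * 5 ^ (k' + 1) * 7 ^ l := by positivity
      have hylt : (2:ℤ) ^ 0 * 3 ^ 0 * 5 ^ k' * 7 ^ l < (2:ℤ) ^ 0 * 3 ^ 0 * 5 ^ (k' + 1) * 7 ^ l := by rw [heq]; linarith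
      have hyN : (2:ℤ) ^ 0 * 3 ^ 0 * 5 ^ k' * 7 ^ l ≤ N := by
        rcases hor with h' | h'
        · rw [heq] at h'
          exfalso
          linarith
        · linarith
      have hymem := ih ((2:ℤ) ^ 0 * 3 ^ 0 * 5 ^ k' * 7 ^ l).toNat (by rw [← hxn]; exact (Int.toNat_lt_toNat hxpos).mpr hylt)
        _ rfl ⟨0, 0, k', l, rfl⟩ (Or.inr hyN)
      have hin := hstep _ 5 hy hymem (by norm_num) heq
      rw [heq]
      exact hin
        | zero =>
          cases l with
          | succ l' =>
      have hy : (0:ℤ) < (2:ℤ) ^ 0 * 3 ^ 0 * 5 ^ 0 * 7 ^ l' := by positivity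
      have heq : (2:ℤ) ^ 0 * 3 ^ 0 * 5 ^ 0 * 7 ^ (l' + 1) = (2:ℤ) ^ 0 * 3 ^ 0 * 5 ^ 0 * 7 ^ l' * 7 := by ring
      have hxpos : (0:ℤ) < (2:ℤ) ^ 0 * 3 ^ 0 * 5 ^ 0 * 7 ^ (l' + 1) := by positivity
      have hylt : (2:ℤ) ^ 0 * 3 ^ 0 * 5 ^ 0 * 7 ^ l' < (2:ℤ) ^ 0 * 3 ^ 0 * 5 ^ 0 * 7 ^ (l' + 1) := by rw [heq]; linarith
      have hyN : (2:ℤ) ^ 0 * 3 ^ 0 * 5 ^ 0 * 7 ^ l' ≤ N := by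
        rcases hor with h' | h'
        · rw [heq] at h'
          exfalso
          linarith
        · linarith
      have hymem := ih ((2:ℤ) ^ 0 * 3 ^ 0 * 5 ^ 0 * 7 ^ l').toNat (by rw [← hxn]; exact (Int.toNat_lt_toNat hxpos).mpr hylt)
        _ rfl ⟨0, 0, 0, l', rfl⟩ (Or.inr hyN)
      have hin := hstep _ 7 hy hymem (by norm_num) heq
      rw [heq]
      exact hin
          | zero =>
            simpa using h1

theorem mem_bfs_final (N : Int) (h : BfsInv N (PySem.Set.ofList [1]) [1]) :
    ∀ x, x ∈ bfs N (PySem.Set.ofList [1]) [1] h ↔ Smooth x ∧ (x = 1 ∨ x ≤ N) := by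
  intro x
  have h1 : (1 : Int) ∈ bfs N (PySem.Set.ofList [1]) [1] h :=
    bfs_grow N _ _ h 1 ((PySem.Set.mem_ofList _ _).mpr (by simp))
  have hcl := bfs_closed N _ _ h (fun x hx hnx => by
    simp [PySem.Set.ofList] at hx
    simp [hx] at hnx)
  constructor
  · exact bfs_sound N (fun y => Smooth y ∧ (y = 1 ∨ y ≤ N))
      (fun v pr hv hpr hle => ⟨smooth_mul hv.1 hpr, Or.inr hle⟩) _ _ h
      (fun x hx => by
        rw [PySem.Set.mem_ofList] at hx
        simp at hx
        subst hx
        exact ⟨⟨0, 0, 0, 0, by norm_num⟩, Or.inl rfl⟩) x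
  · rintro ⟨hsm, hor⟩
    exact smooth_le_mem N _ h1 hcl x.toNat x rfl hsm hor

-- ===== VERDICT (by name: the statement is the Claim_ definition above) =====
theorem calc_py_spec : Claim_equal_calc_py := by
  intro N B hdom hpre
  unfold Spec_calc_py
  by_cases hNB : N < B
  · unfold calc_py calc_py_alt
    rw [if_pos hNB, if_pos hNB]
  · have hB : 0 ≤ B := hpre.resolve_right hNB
    unfold calc_py calc_py_alt
    rw [if_neg hNB, if_neg hNB]
    show loopA N B 1 _ _ = List.foldl _ _ _
    rw [loopA_eq, PySem.List.foldl_ite_add_one (fun p => B + p ≤ N ∧ digitprod (B + p) = p)]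
    have hbase : (if checkData B 0 = true then (0:ℤ) + 1 else 0) =
        (if digitprod B = 0 then (1:ℤ) else 0) := by
      unfold checkData digitprod
      rw [cdLoop_eq_dpLoop]
      by_cases hz : dpLoop B 1 = 0
      · rw [if_pos (by simpa using hz), if_pos hz]
        norm_num
      · rw [if_neg (by simpa using hz), if_neg hz]
    rw [hbase]
    have hinv : BfsInv N (PySem.Set.ofList [1]) [1] := by
      refine ⟨by decide, ?_, by simp⟩
      intro x hx
      simp [PySem.Set.ofList] at hx
      subst hx
      exact ⟨le_refl 1, le_max_left 1 N⟩
    have hfin_nodup := bfs_nodup N (PySem.Set.ofList [1]) [1] hinv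
    have hmemf := mem_bfs_final N hinv
    have hcount : (enumA N).countP (fun p => decide (cP N B p)) =
        (bfs N (PySem.Set.ofList [1]) [1] hinv).countP
          (fun p => decide (B + p ≤ N ∧ digitprod (B + p) = p)) := by
      have hq : ∀ lst : List Int, lst.countP (fun p => decide (cP N B p)) =
          lst.countP (fun p => decide (B + p ≤ N ∧ digitprod (B + p) = p)) := fun lst =>
        List.countP_congr (fun x _ => by simp only [decide_eq_true_eq])
      rw [hq]
      have hperm : ((enumA N).filter (fun p => decide (B + p ≤ N ∧ digitprod (B + p) = p))).Perm
          ((bfs N (PySem.Set.ofList [1]) [1] hinv).filter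
            (fun p => decide (B + p ≤ N ∧ digitprod (B + p) = p))) := by
        rw [List.perm_ext_iff_of_nodup ((enumA_nodup N).filter _) (hfin_nodup.filter _)]
        intro x
        simp only [List.mem_filter, decide_eq_true_eq]
        constructor
        · rintro ⟨hm, hcond⟩
          obtain ⟨hsm, hle⟩ := mem_enumA.mp hm
          exact ⟨(hmemf x).mpr ⟨hsm, Or.inr hle⟩, hcond⟩
        · rintro ⟨hm, hcond⟩
          obtain ⟨hsm, hor⟩ := (hmemf x).mp hm
          have hxpos : 0 < x := smooth_pos hsm
          have hxN : x ≤ N := by linarith [hcond.1]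
          exact ⟨mem_enumA.mpr ⟨hsm, hxN⟩, hcond⟩
      rw [List.countP_eq_length_filter, List.countP_eq_length_filter, hperm.length_eq]
    exact congrArg (fun m : ℕ => (if digitprod B = 0 then (1:ℤ) else 0) + (m : ℤ)) hcount
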